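-- pv_equiv track=rewrite | github.com/ADITI9981/Leetcode_Contest | Weekly_Contest_446/100554. Make Array Non-decreasing.py | maximumPossibleSize
-- ===== SOURCE A (Python) =====
-- def maximumPossibleSize(nums):
--     """
--     :type nums: List[int]
--     :rtype: int
--     """
--     count =0
--     i=0
--     n=len(nums)
--     prev=-1
--
--     while i<n:
--         min_val =max_val=nums[i]
--         j=i
--         while j<n:
--             min_val =min(min_val,nums[j])
--             max_val = max(max_val,nums[j])
--             if max_val >=prev:
--                 break
--             j+=1
--
--         if max_val >=prev:
--             prev =max_val
--             count +=1
--             i = j+1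
--         else:
--             break
--     return count
-- ===== SOURCE B (Python) =====
-- def maximumPossibleSize(nums):
--     """
--     :type nums: List[int]
--     :rtype: int
--     """
--     prev = -1
--     count = 0
--     cur_max = 0
--     start_new = True
--     for x in nums:
--         cur_max = x if start_new else max(cur_max, x)
--         if cur_max >= prev:
--             prev = cur_max
--             count += 1
--             start_new = True
--         else:
--             start_new = False
--     return count
-- ===== Notes on version B (the rewrite author's own statement) =====
-- stated objective: simpler
-- what changed: Replaced the nested while loops (outer group loop with an inner scan restarting min/max at each group) by a single forward for-loop maintaining a running group maximum and a start-new-group flag, dropping the unused min_val and all index arithmetic.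
import Mathlib
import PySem

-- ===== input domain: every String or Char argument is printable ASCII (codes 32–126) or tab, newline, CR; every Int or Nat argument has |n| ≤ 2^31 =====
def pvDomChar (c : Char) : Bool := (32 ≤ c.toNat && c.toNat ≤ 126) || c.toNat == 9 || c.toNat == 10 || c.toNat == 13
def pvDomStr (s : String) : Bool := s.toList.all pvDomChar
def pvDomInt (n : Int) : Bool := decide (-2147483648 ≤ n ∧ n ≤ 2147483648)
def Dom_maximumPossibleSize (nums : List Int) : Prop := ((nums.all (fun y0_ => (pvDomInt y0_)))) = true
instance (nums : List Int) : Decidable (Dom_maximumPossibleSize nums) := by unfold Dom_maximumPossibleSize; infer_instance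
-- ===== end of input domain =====

-- B replaces A's nested while loops by one forward pass with a running group maximum
-- and a start-new-group flag (unused min_val dropped); same return value, objective: simpler.

-- ===== PORT A =====
-- inner while loop of A: scans j forward, accumulating min/max; breaks when max_val >= prev.
-- The fuel argument only makes the recursion structural; it is always called with fuel ≥ n - j,
-- so the fuel-0 branch is reached only with j ≥ n, where the Python loop also stops.
-- nums.getD j 0 is exact for Python's nums[j]: it is only evaluated under j < n = len(nums).
def pvInnerA (nums : List Int) (n : Nat) (prev : Int) :
    Nat → Int → Int → Nat → Int × Int × Nat
  | 0, minv, maxv, j => (minv, maxv, j)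
  | fuel + 1, minv, maxv, j =>
    if j < n then
      let x := nums.getD j 0
      let minv' := min minv x
      let maxv' := max maxv x
      if maxv' ≥ prev then (minv', maxv', j)
      else pvInnerA nums n prev fuel minv' maxv' (j + 1)
    else (minv, maxv, j)

-- outer while loop of A; fuel (always ≥ n - i at the call) again only makes it structural.
def pvOuterA (nums : List Int) (n : Nat) :
    Nat → Int → Int → Nat → Int
  | 0, _, count, _ => count
  | fuel + 1, prev, count, i =>
    if i < n then
      let x := nums.getD i 0
      let r := pvInnerA nums n prev n x x i
      if r.2.1 ≥ prev then pvOuterA nums n fuel r.2.1 (count + 1) (r.2.2 + 1)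
      else count
    else count

def maximumPossibleSize (nums : List Int) : Int :=
  pvOuterA nums nums.length nums.length (-1) 0 0

-- ===== PORT B =====
def pvAltLoop (prev count curMax : Int) (startNew : Bool) : List Int → Int
  | [] => count
  | x :: rest =>
    let c := if startNew then x else max curMax x
    if c ≥ prev then pvAltLoop c (count + 1) c true rest
    else pvAltLoop prev count c false rest

def maximumPossibleSize_alt (nums : List Int) : Int :=
  pvAltLoop (-1) 0 0 true nums

-- ===== PRECONDITION & SPEC =====
def Spec_maximumPossibleSize (nums : List Int) (out : Int) : Prop := out = maximumPossibleSize_alt nums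
instance (nums : List Int) (out : Int) : Decidable (Spec_maximumPossibleSize nums out) := by unfold Spec_maximumPossibleSize; infer_instance

-- ===== CLAIM (what is proved, stated in full; the proofs are below) =====
def Claim_equal_maximumPossibleSize : Prop := ∀ (nums : List Int), Dom_maximumPossibleSize nums → Spec_maximumPossibleSize nums (maximumPossibleSize nums)

-- ===== LEMMAS AND PROOFS =====

-- unfolding of the inner loop at a live index, for any positive fuel
theorem pvInnerA_pos (nums : List Int) (n : Nat) (prev : Int) (fuel : Nat)
    (minv maxv : Int) (j : Nat) (h : j < n) (hf : 0 < fuel) :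
    pvInnerA nums n prev fuel minv maxv j =
      (if max maxv (nums.getD j 0) ≥ prev then
        (min minv (nums.getD j 0), max maxv (nums.getD j 0), j)
      else pvInnerA nums n prev (fuel - 1) (min minv (nums.getD j 0))
        (max maxv (nums.getD j 0)) (j + 1)) := by
  match fuel with
  | f + 1 => rw [pvInnerA, if_pos h]; simp

-- main invariant, proved by strong induction on nums.length - j:
--  Main: the outer loop at index j (with enough fuel) equals the alt loop in the
--        "start new group" state (its curMax argument is then irrelevant);
--  Inner: the outer loop's handling of an in-progress inner scan at index j with
--         current maximum maxv < prev equals the alt loop in state (maxv, startNew = false).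
theorem pv_main_inner (nums : List Int) (k : Nat) :
    ∀ j, nums.length - j = k → j ≤ nums.length →
      ((∀ (f : Nat) (prev count c : Int), nums.length ≤ j + f →
          pvOuterA nums nums.length f prev count j
            = pvAltLoop prev count c true (nums.drop j)) ∧
       (∀ (fi g : Nat) (prev minv maxv count : Int),
          maxv < prev → nums.length ≤ j + fi → nums.length ≤ j + 1 + g →
          (if (pvInnerA nums nums.length prev fi minv maxv j).2.1 ≥ prev then
              pvOuterA nums nums.length g
                (pvInnerA nums nums.length prev fi minv maxv j).2.1
                (count + 1) ((pvInnerA nums nums.length prev fi minv maxv j).2.2 + 1)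
            else count)
            = pvAltLoop prev count maxv false (nums.drop j))) := by
  induction k using Nat.strong_induction_on with
  | _ k ih =>
    intro j hk hj
    by_cases hjn : j < nums.length
    · have hdrop : nums.drop j = nums[j] :: nums.drop (j + 1) :=
        List.drop_eq_getElem_cons hjn
      have hget : nums.getD j 0 = nums[j] := List.getD_eq_getElem nums 0 hjn
      have hIH := ih (nums.length - (j + 1)) (by omega) (j + 1) rfl (by omega)
      constructor
      · intro f prev count c hf
        have hAlt : pvAltLoop prev count c true (nums.drop j)
            = (if nums[j] ≥ prev then
                pvAltLoop nums[j] (count + 1) nums[j] true (nums.drop (j + 1))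
              else pvAltLoop prev count nums[j] false (nums.drop (j + 1))) := by
          rw [hdrop]; simp [pvAltLoop]
        rw [hAlt]
        match f with
        | 0 => exact absurd rfl (by omega : ¬ (0 : Nat) = 0)
        | fuel + 1 =>
          rw [pvOuterA, if_pos hjn]
          simp only [hget]
          rw [pvInnerA_pos nums nums.length prev nums.length nums[j] nums[j] j hjn (by omega)]
          simp only [hget, min_self, max_self]
          by_cases hge : nums[j] ≥ prev
          · simp only [if_pos hge]
            exact hIH.1 fuel nums[j] (count + 1) nums[j] (by omega)
          · simp only [if_neg hge]
            have hlt : nums[j] < prev := by omega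
            have := hIH.2 (nums.length - 1) fuel prev nums[j] nums[j] count hlt
              (by omega) (by omega)
            rw [this]
      · intro fi g prev minv maxv count hmax hfi hg
        have hAlt : pvAltLoop prev count maxv false (nums.drop j)
            = (if max maxv nums[j] ≥ prev then
                pvAltLoop (max maxv nums[j]) (count + 1) (max maxv nums[j]) true
                  (nums.drop (j + 1))
              else pvAltLoop prev count (max maxv nums[j]) false (nums.drop (j + 1))) := by
          rw [hdrop]; simp [pvAltLoop]
        rw [hAlt]
        match fi with
        | 0 => exact absurd rfl (by omega : ¬ (0 : Nat) = 0)
        | fuel + 1 =>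
          rw [pvInnerA, if_pos hjn]
          simp only [hget]
          by_cases hge : max maxv nums[j] ≥ prev
          · simp only [if_pos hge]
            exact hIH.1 g (max maxv nums[j]) (count + 1) (max maxv nums[j]) (by omega)
          · simp only [if_neg hge]
            have := hIH.2 fuel g prev (min minv nums[j]) (max maxv nums[j]) count
              (by omega) (by omega) (by omega)
            rw [this]
    · have hnil : nums.drop j = [] := List.drop_eq_nil_of_le (by omega)
      constructor
      · intro f prev count c _
        match f with
        | 0 => rw [pvOuterA, hnil, pvAltLoop]
        | fuel + 1 => rw [pvOuterA, if_neg hjn, hnil, pvAltLoop]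
      · intro fi g prev minv maxv count hmax _ _
        match fi with
        | 0 =>
          rw [pvInnerA, hnil, pvAltLoop]
          simp [not_le.mpr hmax]
        | fuel + 1 =>
          rw [pvInnerA, if_neg hjn, hnil, pvAltLoop]
          simp [not_le.mpr hmax]

-- ===== VERDICT (by name: the statement is the Claim_ definition above) =====
theorem maximumPossibleSize_spec : Claim_equal_maximumPossibleSize := by
  intro nums _
  unfold Spec_maximumPossibleSize maximumPossibleSize maximumPossibleSize_alt
  have := (pv_main_inner nums (nums.length - 0) 0 rfl (by omega)).1
    nums.length (-1) 0 0 (by omega)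
  simpa using this
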